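-- pv_equiv track=rewrite | github.com/parkjeongmi/jamie_study | hash/hash2.py | solution
-- ===== SOURCE A (Python) =====
-- def solution(phoneBook) :
--     answer = True
--     hash_map = {}
--     for i in phoneBook :
--         hash_map[i] = 1
--     for i in phoneBook :
--         temp = ""
--         for j in phoneBook :
--             temp += j
--             if temp in hash_map and temp != i :
--                 answer = False
--     return answer
-- ===== SOURCE B (Python) =====
-- def solution(phoneBook):
--     # A's nested scans reduce to: True iff the book is empty or all entries are equal.
--     if not phoneBook:
--         return True
--     first = phoneBook[0]
--     return all(x == first for x in phoneBook)
-- ===== Notes on version B (the rewrite author's own statement) =====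
-- stated objective: faster
-- what changed: Replaced the dict build plus O(n^2) nested concatenation scans by the closed form the loops actually compute: the answer is True iff the list is empty or all entries are equal, checked in one pass.
import Mathlib
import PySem

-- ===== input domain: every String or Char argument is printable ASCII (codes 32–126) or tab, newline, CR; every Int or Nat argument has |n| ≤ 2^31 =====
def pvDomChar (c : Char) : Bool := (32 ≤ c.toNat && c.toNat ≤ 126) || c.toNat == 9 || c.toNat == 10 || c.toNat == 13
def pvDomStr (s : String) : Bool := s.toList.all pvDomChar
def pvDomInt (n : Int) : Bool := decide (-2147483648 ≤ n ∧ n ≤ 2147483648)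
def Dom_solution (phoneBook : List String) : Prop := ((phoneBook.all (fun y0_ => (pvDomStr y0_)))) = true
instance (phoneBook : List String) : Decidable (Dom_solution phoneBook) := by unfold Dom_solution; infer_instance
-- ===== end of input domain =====

-- B replaces A's dict build and nested concatenation scans by the closed form those
-- loops compute: true iff the book is empty or all entries are equal (one pass, faster).

-- ===== PORT A =====
-- body of A's inner 'for j in phoneBook' loop: state is (answer, temp)
def stepA (hash_map : PySem.Dict String Int) (i : String) (st : Bool × String) (j : String) : Bool × String :=
  let temp := st.2 ++ j
  if hash_map.contains temp && temp != i then (false, temp) else (st.1, temp)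

def solution (phoneBook : List String) : Bool :=
  let hash_map : PySem.Dict String Int :=
    phoneBook.foldl (fun d i => d.insert i 1) PySem.Dict.empty
  phoneBook.foldl (fun answer i => (phoneBook.foldl (stepA hash_map i) (answer, "")).1) true

-- ===== PORT B =====
def solution_alt (phoneBook : List String) : Bool :=
  match phoneBook with
  | [] => true
  | first :: rest => (first :: rest).all (fun x => x == first)

-- ===== PRECONDITION & SPEC =====
def Spec_solution (phoneBook : List String) (out : Bool) : Prop := out = solution_alt phoneBook
instance (phoneBook : List String) (out : Bool) : Decidable (Spec_solution phoneBook out) := by unfold Spec_solution; infer_instance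

-- ===== CLAIM (what is proved, stated in full; the proofs are below) =====
def Claim_equal_solution : Prop := ∀ (phoneBook : List String), Dom_solution phoneBook → Spec_solution phoneBook (solution phoneBook)

-- ===== LEMMAS AND PROOFS =====

-- cumulative concatenations of the list, starting from t (the values 'temp' takes)
def pvCum (t : String) : List String → List String
  | [] => []
  | j :: rest => (t ++ j) :: pvCum (t ++ j) rest

theorem pv_hm_contains (pb : List String) (d : PySem.Dict String Int) (s : String) :
    (pb.foldl (fun d i => d.insert i 1) d).contains s = (d.contains s || s ∈ pb) := by
  induction pb generalizing d with
  | nil => simp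
  | cons h t ih =>
    simp only [List.foldl_cons, ih, PySem.Dict.contains_insert, List.mem_cons]
    by_cases hs : s = h
    · simp [hs]
    · have hb : (s == h) = false := by simp [hs]
      simp [hs, hb]

theorem pv_contains_mem (pb : List String) (p : String) :
    (pb.foldl (fun d i => d.insert i 1) (PySem.Dict.empty : PySem.Dict String Int)).contains p
      = decide (p ∈ pb) := by
  rw [pv_hm_contains]
  simp [PySem.Dict.empty]

theorem pv_inner (hm : PySem.Dict String Int) (i : String) (l : List String)
    (b : Bool) (t : String) :
    (l.foldl (stepA hm i) (b, t)).1
      = (b && !(pvCum t l).any (fun p => hm.contains p && p != i)) := by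
  induction l generalizing b t with
  | nil => simp [pvCum]
  | cons j rest ih =>
    rw [List.foldl_cons]
    by_cases hc : (hm.contains (t ++ j) && (t ++ j) != i) = true
    · simp [stepA, hc, pvCum, ih]
    · simp [stepA, hc, pvCum, ih]

theorem pv_outer (hm : PySem.Dict String Int) (pb l : List String) (b : Bool) :
    l.foldl (fun answer i => (pb.foldl (stepA hm i) (answer, "")).1) b
      = (b && l.all (fun i => !(pvCum "" pb).any (fun p => hm.contains p && p != i))) := by
  induction l generalizing b with
  | nil => simp
  | cons h tl ih =>
    rw [List.foldl_cons, pv_inner, ih, List.all_cons, Bool.and_assoc]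

theorem pv_char_true (pb : List String) :
    solution pb = true ↔ ∀ i ∈ pb, ∀ p ∈ pvCum "" pb, p ∈ pb → p = i := by
  unfold solution
  simp only
  rw [pv_outer, Bool.true_and]
  simp only [pv_contains_mem]
  simp [List.all_eq_true, List.any_eq_false]

theorem pv_head_mem_cum (first : String) (rest : List String) :
    first ∈ pvCum "" (first :: rest) := by
  simp [pvCum]

theorem solution_spec : Claim_equal_solution := by
  intro pb _
  unfold Spec_solution
  rw [Bool.eq_iff_iff, pv_char_true]
  cases pb with
  | nil => simp [solution_alt]
  | cons first rest =>
    simp only [solution_alt, List.all_eq_true, beq_iff_eq]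
    constructor
    · intro h x hx
      exact (h x hx first (pv_head_mem_cum first rest) (by simp)).symm
    · intro h i hi p _ hpm
      exact (h p hpm).trans (h i hi).symm
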